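-- pv_equiv track=rewrite | github.com/zeee1/programmers | src/ntech_codingTest_2019/ntech_1.py | solution
-- ===== SOURCE A (Python) =====
-- def solution(a, b, budget):
--     answer = 0
--
--     if budget%a ==0:
--     	answer += 1
--
--     if budget%b == 0:
--     	answer += 1
--
--     budget -= a
--
--     while True:
--     	if budget < b:
--     		break
--
--     	if budget%b == 0:
--     		answer+=1
--
--     	budget -= a
--
--     return answer
-- ===== SOURCE B (Python) =====
-- def _gcd(x, y):
--     x, y = abs(x), abs(y)
--     while y:
--         x, y = y, x % y
--     return x
--
--
-- def solution(a, b, budget):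
--     # the two initial divisibility checks
--     answer = (budget % a == 0) + (budget % b == 0)
--     # loop iterations of the step-down scan use budget - k*a for k = 1..K
--     K = (budget - b) // a
--     # hits (b | budget - k*a) recur with period m = |b| // gcd(a, b), so it is
--     # enough to probe the first min(m, K) steps for the first hit and count the
--     # remaining hits in closed form
--     m = abs(b) // _gcd(a, b)
--     k0 = next((k for k in range(1, min(m, K) + 1) if (budget - k * a) % b == 0), None)
--     if k0 is not None:
--         answer += (K - k0) // m + 1
--     return answer
-- ===== Notes on version B (the rewrite author's own statement) =====
-- stated objective: faster
-- what changed: Replaces A's step-down scan over all multiples of a up to budget with a number-theoretic count: hits of b recur with period |b|/gcd(a,b), so B probes at most min(period, K) steps for the first hit and counts the rest with one floor division.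
-- outside the precondition, e.g. on solution(-1, 4, 0): A returns 2, B returns 3; on solution(0, 4, 8): A raises ZeroDivisionError, B raises ZeroDivisionError
import Mathlib
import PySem

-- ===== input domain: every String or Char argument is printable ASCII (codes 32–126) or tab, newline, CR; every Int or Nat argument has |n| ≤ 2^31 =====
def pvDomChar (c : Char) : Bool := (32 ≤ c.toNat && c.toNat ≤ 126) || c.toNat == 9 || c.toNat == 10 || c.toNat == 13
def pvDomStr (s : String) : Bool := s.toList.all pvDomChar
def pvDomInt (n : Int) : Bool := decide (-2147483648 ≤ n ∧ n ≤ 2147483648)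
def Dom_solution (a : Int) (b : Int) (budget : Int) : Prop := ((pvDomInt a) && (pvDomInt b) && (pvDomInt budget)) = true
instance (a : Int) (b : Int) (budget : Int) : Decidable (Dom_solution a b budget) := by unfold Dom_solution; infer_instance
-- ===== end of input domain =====

-- B replaces A's step-down scan (one probe per multiple of a) by a periodicity argument:
-- it probes only the first |b|/gcd(a,b) steps and counts all remaining hits in closed form.


-- ===== PORT A =====
-- A's 'while True' loop; the 'a ≤ 0' guard only makes the recursion total
-- (Pre_solution requires 0 < a, where A's loop terminates)
def solutionLoop (a : Int) (b : Int) (budget : Int) (answer : Int) : Int :=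
  if budget < b then answer
  else if _h : a ≤ 0 then answer
  else solutionLoop a b (budget - a)
        (if PySem.Int.mod budget b = 0 then answer + 1 else answer)
termination_by (budget - b + 1).toNat
decreasing_by omega

def solution (a : Int) (b : Int) (budget : Int) : Int :=
  let answer : Int := 0
  let answer := if PySem.Int.mod budget a = 0 then answer + 1 else answer
  let answer := if PySem.Int.mod budget b = 0 then answer + 1 else answer
  solutionLoop a b (budget - a) answer

-- ===== PORT B =====
-- Source B's _gcd: while y: x, y = y, x % y   (on absolute values)
def pgcdLoop (x : Nat) (y : Nat) : Nat :=
  if y = 0 then x else pgcdLoop y (x % y)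
termination_by y
decreasing_by exact Nat.mod_lt _ (by omega)

def pgcd (x : Int) (y : Int) : Int := (pgcdLoop x.natAbs y.natAbs : Int)

-- next((k for k in range(1, min(m, K)+1) if (budget - k*a) % b == 0), None) is List.find? over the range
def solution_alt (a : Int) (b : Int) (budget : Int) : Int :=
  let answer : Int :=
    (if PySem.Int.mod budget a = 0 then 1 else 0) + (if PySem.Int.mod budget b = 0 then 1 else 0)
  let K := PySem.Int.floordiv (budget - b) a
  let m := PySem.Int.floordiv |b| (pgcd a b)
  match (PySem.List.pyRange 1 (min m K + 1) 1).find?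
          (fun k => PySem.Int.mod (budget - k * a) b == 0) with
  | some k0 => answer + (PySem.Int.floordiv (K - k0) m + 1)
  | none => answer

-- ===== PRECONDITION & SPEC =====
-- Pre_ excludes b = 0 and a = 0 (ZeroDivisionError) and a < 0, a negative step outside the
-- task's domain: there A loops forever whenever budget - a ≥ b, and where it does return,
-- its value is an accident of the descending scan that B's period arithmetic does not model.
def Pre_solution (a : Int) (b : Int) (budget : Int) : Prop := 0 < a ∧ b ≠ 0
instance (a : Int) (b : Int) (budget : Int) : Decidable (Pre_solution a b budget) := by
  unfold Pre_solution; infer_instance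

def pvWitness_solution : Int × Int × Int := (3, 5, 40)

def Spec_solution (a : Int) (b : Int) (budget : Int) (out : Int) : Prop := out = solution_alt a b budget
instance (a : Int) (b : Int) (budget : Int) (out : Int) : Decidable (Spec_solution a b budget out) := by unfold Spec_solution; infer_instance

-- ===== CLAIM (what is proved, stated in full; the proofs are below) =====
def Claim_equal_solution : Prop := ∀ (a : Int) (b : Int) (budget : Int), Dom_solution a b budget → Pre_solution a b budget → Spec_solution a b budget (solution a b budget)

-- ===== LEMMAS AND PROOFS =====

theorem pgcdLoop_eq (x y : Nat) : pgcdLoop x y = Nat.gcd y x := by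
  induction x, y using pgcdLoop.induct with
  | case1 x => simp [pgcdLoop]
  | case2 x y h ih => rw [pgcdLoop]; simp only [if_neg h]; rw [ih]; exact (Nat.gcd_rec y x).symm

theorem pgcd_eq (x y : Int) : pgcd x y = (Int.gcd x y : Int) := by
  unfold pgcd
  rw [pgcdLoop_eq, Int.gcd]
  exact congrArg _ (Nat.gcd_comm _ _)
theorem card_filter_Icc_shift (P : ℤ → Prop) [DecidablePred P] (lo hi c : ℤ) :
    ((Finset.Icc lo hi).filter P).card
      = ((Finset.Icc (lo - c) (hi - c)).filter (fun k => P (k + c))).card := by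
  have h := Finset.map_add_right_Icc (lo - c) (hi - c) c
  simp only [sub_add_cancel] at h
  rw [← h, Finset.filter_map, Finset.card_map]
  rfl

theorem count_shift (a b t K : Int) :
    ((Finset.Icc (1:ℤ) K).filter (fun k => (t - k * a) % b = 0)).card
      = ((Finset.Icc (0:ℤ) (K - 1)).filter (fun k => (t - a - k * a) % b = 0)).card := by
  rw [card_filter_Icc_shift (fun k => (t - k * a) % b = 0) 1 K 1]
  norm_num
  congr 1
  apply Finset.filter_congr
  intro x _
  rw [show t - (x + 1) * a = t - a - x * a by ring]

theorem count_cons (a b t K : Int) (hK : 0 ≤ K) :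
    (((Finset.Icc (0:ℤ) K).filter (fun k => (t - k * a) % b = 0)).card : Int)
      = (if t % b = 0 then 1 else 0)
        + (((Finset.Icc (0:ℤ) (K - 1)).filter (fun k => (t - a - k * a) % b = 0)).card : Int) := by
  have h0 : (Finset.Icc (0:ℤ) K) = insert 0 (Finset.Icc 1 K) := by
    ext x; simp only [Finset.mem_Icc, Finset.mem_insert]; omega
  have hshift := count_shift a b t K
  rw [h0, Finset.filter_insert]
  simp only [zero_mul, sub_zero]
  split_ifs with hp
  · rw [Finset.card_insert_of_notMem (by simp), hshift]; push_cast; ring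
  · rw [hshift]; push_cast; ring

theorem solutionLoop_eq (a b : Int) (ha : 0 < a) (hb : b ≠ 0) :
    ∀ t ans, solutionLoop a b t ans =
      ans + (((Finset.Icc (0:ℤ) ((t - b) / a)).filter (fun k => (t - k * a) % b = 0)).card : Int) := by
  intro t ans
  induction t, ans using solutionLoop.induct a b with
  | case1 t ans hlt =>
    rw [solutionLoop, if_pos hlt]
    have : (t - b) / a < 0 := Int.ediv_neg_of_neg_of_pos (by omega) ha
    rw [Finset.Icc_eq_empty (by omega)]
    simp
  | case2 t ans hlt ha' => omega
  | case3 t ans hlt ha' ih =>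
    rw [solutionLoop, if_neg hlt, dif_neg ha']
    simp only [dite_eq_ite] at ih
    rw [ih]
    have hK : 0 ≤ (t - b) / a := Int.ediv_nonneg (by omega) (by omega)
    have hstep : (t - a - b) / a = (t - b) / a - 1 := by
      rw [show t - a - b = (t - b) + (-1) * a by ring, Int.add_mul_ediv_right _ _ (by omega : a ≠ 0)]; ring
    have hmb : PySem.Int.mod t b = 0 ↔ t % b = 0 := by
      rw [PySem.Int.mod_eq_zero_iff_dvd, EuclideanDomain.mod_eq_zero]
    rw [hstep]
    simp only [hmb]
    have hc := count_cons a b t ((t - b) / a) hK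
    split_ifs with h1 <;> simp only [h1, if_true, if_false, ite_true, ite_false] at hc <;> omega

theorem b_dvd_m_mul (a b : ℤ) (ha : a ≠ 0) :
    b ∣ (|b| / (Int.gcd a b : ℤ)) * a := by
  have hga : (Int.gcd a b : ℤ) ∣ a := Int.gcd_dvd_left a b
  have hg : 0 < (Int.gcd a b : ℤ) := by exact_mod_cast Int.gcd_pos_of_ne_zero_left b ha
  set g : ℤ := (Int.gcd a b : ℤ) with hgdef
  obtain ⟨a', ha'⟩ := hga
  have habs : g * (|b| / g) = |b| := by
    rw [Int.mul_ediv_cancel']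
    exact dvd_trans (Int.gcd_dvd_right a b) (self_dvd_abs b)
  calc b ∣ |b| := self_dvd_abs b
    _ ∣ |b| * a' := dvd_mul_right _ _
    _ = (|b| / g) * a := by
      rw [ha']
      calc |b| * a' = (g * (|b| / g)) * a' := by rw [habs]
        _ = |b| / g * (g * a') := by ring

theorem m_dvd_of_b_dvd_mul (a b x : ℤ) (ha : a ≠ 0) (h : b ∣ x * a) :
    (|b| / (Int.gcd a b : ℤ)) ∣ x := by
  have hga : (Int.gcd a b : ℤ) ∣ a := Int.gcd_dvd_left a b
  have hgb : (Int.gcd a b : ℤ) ∣ b := Int.gcd_dvd_right a b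
  have hg : 0 < (Int.gcd a b : ℤ) := by exact_mod_cast Int.gcd_pos_of_ne_zero_left b ha
  set g : ℤ := (Int.gcd a b : ℤ) with hgdef
  obtain ⟨a', ha'⟩ := hga
  obtain ⟨b', hb'⟩ := hgb
  have hco : IsCoprime b' a' := by
    have h1 : Int.gcd (a / g) (b / g) = 1 := by
      apply Int.gcd_ediv_gcd_ediv_gcd
      exact Int.gcd_pos_of_ne_zero_left b ha
    have h2 : a / g = a' := by rw [ha']; exact Int.mul_ediv_cancel_left _ (by omega)
    have h3 : b / g = b' := by rw [hb']; exact Int.mul_ediv_cancel_left _ (by omega)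
    rw [h2, h3] at h1
    exact (Int.isCoprime_iff_gcd_eq_one.mpr (by rwa [Int.gcd_comm]))
  have hb'x : b' ∣ x := by
    have h4 : g * b' ∣ g * (x * a') := by
      rw [← hb']
      calc b ∣ x * a := h
        _ = g * (x * a') := by rw [ha']; ring
    exact hco.dvd_of_dvd_mul_right ((Int.mul_dvd_mul_iff_left (by omega : g ≠ 0)).mp h4)
  have hm : |b| / g = |b'| := by
    rw [hb', abs_mul, abs_of_pos hg]
    exact Int.mul_ediv_cancel_left _ (by omega)
  rw [hm, abs_dvd]
  exact hb'x

theorem count_progression (m k0 K : ℤ) (hm : 0 < m) (hk0 : 1 ≤ k0) (hk0m : k0 ≤ m) :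
    (((Finset.Icc (1:ℤ) K).filter (fun k => m ∣ k - k0)).card : ℤ)
      = if k0 ≤ K then (K - k0) / m + 1 else 0 := by
  split_ifs with hKk
  · set q := (K - k0) / m with hq
    have hq0 : 0 ≤ q := Int.ediv_nonneg (by omega) (by omega)
    have hdm := Int.ediv_add_emod (K - k0) m
    have hr0 := Int.emod_nonneg (K - k0) (by omega : m ≠ 0)
    have hrm := Int.emod_lt_of_pos (K - k0) hm
    have hqm : m * q ≤ K - k0 := by rw [hq]; linarith
    have key : (Finset.Icc (0:ℤ) q).map
        ⟨fun t => k0 + t * m, fun s t hst => by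
          simp only at hst
          have : s * m = t * m := by linarith
          exact mul_right_cancel₀ (by omega) this⟩
        = (Finset.Icc 1 K).filter (fun k => m ∣ k - k0) := by
      ext x
      simp only [Finset.mem_map, Finset.mem_Icc, Finset.mem_filter, Function.Embedding.coeFn_mk]
      constructor
      · rintro ⟨t, ht, rfl⟩
        have h1 : 0 ≤ t * m := mul_nonneg ht.1 (by omega)
        have h2 : t * m ≤ q * m := mul_le_mul_of_nonneg_right ht.2 (by omega)
        refine ⟨⟨by linarith, by linarith⟩, ⟨t, by ring⟩⟩
      · rintro ⟨⟨hx1, hxK⟩, t, ht⟩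
        refine ⟨t, ⟨?_, ?_⟩, by linarith⟩
        · by_contra hneg
          have h1 : t ≤ -1 := by omega
          have h2 : m * t ≤ m * (-1) := mul_le_mul_of_nonneg_left h1 (by omega)
          linarith
        · rw [hq]
          apply (Int.le_ediv_iff_mul_le hm).mpr
          linarith
    rw [← key, Finset.card_map, Int.card_Icc]
    omega
  · rw [Finset.filter_eq_empty_iff.mpr, Finset.card_empty]
    · rfl
    · intro x hx
      rw [Finset.mem_Icc] at hx
      intro hdvd
      have h0 : x - k0 = 0 := Int.eq_zero_of_abs_lt_dvd hdvd (by rw [abs_lt] at *; omega)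
      omega

theorem alt_count (a b budget K : ℤ) (ha : 0 < a) (hb : b ≠ 0) :
    (((Finset.Icc (1:ℤ) K).filter (fun k => (budget - k * a) % b = 0)).card : ℤ)
      = (match (PySem.List.pyRange 1 (min (|b| / (Int.gcd a b : ℤ)) K + 1) 1).find?
            (fun k => PySem.Int.mod (budget - k * a) b == 0) with
         | some k0 => PySem.Int.floordiv (K - k0) (|b| / (Int.gcd a b : ℤ)) + 1
         | none => 0) := by
  have hg : 0 < (Int.gcd a b : ℤ) := by exact_mod_cast Int.gcd_pos_of_ne_zero_left b (by omega)
  have hgb : (Int.gcd a b : ℤ) ∣ |b| := dvd_trans (Int.gcd_dvd_right a b) (self_dvd_abs b)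
  set m := |b| / (Int.gcd a b : ℤ) with hmdef
  have hbabs : 0 < |b| := abs_pos.mpr hb
  have hmg : m * (Int.gcd a b : ℤ) = |b| := Int.ediv_mul_cancel hgb
  have hmpos : 0 < m := by nlinarith
  have hbma : b ∣ m * a := b_dvd_m_mul a b (by omega)
  cases hfind : (PySem.List.pyRange 1 (min m K + 1) 1).find?
      (fun k => PySem.Int.mod (budget - k * a) b == 0) with
  | none =>
    have hnone := List.find?_eq_none.mp hfind
    rw [Finset.filter_eq_empty_iff.mpr, Finset.card_empty]
    · rfl
    · intro k hk hP
      rw [Finset.mem_Icc] at hk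
      have hPk : b ∣ budget - k * a := EuclideanDomain.mod_eq_zero.mp hP
      set r := (k - 1) % m + 1 with hr
      have he1 := Int.emod_nonneg (k - 1) (by omega : m ≠ 0)
      have he2 := Int.emod_lt_of_pos (k - 1) hmpos
      have he3 := Int.ediv_add_emod (k - 1) m
      have hmdvd : m ∣ k - r := ⟨(k - 1) / m, by linarith⟩
      have hPr : b ∣ budget - r * a := by
        obtain ⟨t, ht⟩ := hmdvd
        have h4 : budget - r * a = (budget - k * a) + t * (m * a) := by
          rw [show t * (m * a) = (m * t) * a by ring, ← ht]; ring
        rw [h4]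
        exact dvd_add hPk (Dvd.dvd.mul_left hbma t)
      have hq0 : 0 ≤ (k - 1) / m := Int.ediv_nonneg (by omega) (by omega)
      have hprod : 0 ≤ m * ((k - 1) / m) := mul_nonneg (by omega) hq0
      have hrk : r ≤ k := by omega
      have hmem : r ∈ PySem.List.pyRange 1 (min m K + 1) 1 :=
        PySem.List.mem_pyRange_one.mpr ⟨by omega, by omega⟩
      have := hnone r hmem
      rw [beq_iff_eq, PySem.Int.mod_eq_zero_iff_dvd] at this
      exact this hPr
  | some k0 =>
    have hmem := List.mem_of_find?_eq_some hfind
    have hk0 := List.find?_some hfind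
    rw [PySem.List.mem_pyRange_one] at hmem
    rw [beq_iff_eq, PySem.Int.mod_eq_zero_iff_dvd] at hk0
    have hcongr : (Finset.Icc (1:ℤ) K).filter (fun k => (budget - k * a) % b = 0)
        = (Finset.Icc (1:ℤ) K).filter (fun k => m ∣ k - k0) := by
      apply Finset.filter_congr
      intro x _
      rw [EuclideanDomain.mod_eq_zero]
      constructor
      · intro hPx
        apply m_dvd_of_b_dvd_mul a b _ (by omega)
        have h5 : (x - k0) * a = (budget - k0 * a) - (budget - x * a) := by ring
        rw [h5]
        exact dvd_sub hk0 hPx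
      · intro hmd
        obtain ⟨t, ht⟩ := hmd
        have h4 : budget - x * a = (budget - k0 * a) - t * (m * a) := by
          rw [show t * (m * a) = (m * t) * a by ring, ← ht]; ring
        rw [h4]
        exact dvd_sub hk0 (Dvd.dvd.mul_left hbma t)
    simp only [PySem.Int.floordiv_eq_ediv_of_pos hmpos]
    rw [hcongr, count_progression m k0 K hmpos hmem.1 (by omega), if_pos (by omega : k0 ≤ K)]

-- ===== VERDICT (by name: the statement is the Claim_ definition above) =====
theorem solution_spec : Claim_equal_solution := by
  intro a b budget _ hpre
  obtain ⟨ha, hb⟩ := hpre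
  have hg : 0 < (Int.gcd a b : ℤ) := by exact_mod_cast Int.gcd_pos_of_ne_zero_left b (by omega)
  unfold Spec_solution
  simp only [solution, solution_alt]
  rw [pgcd_eq, PySem.Int.floordiv_eq_ediv_of_pos ha, PySem.Int.floordiv_eq_ediv_of_pos hg]
  rw [solutionLoop_eq a b ha hb]
  have harith : (budget - a - b) / a = (budget - b) / a - 1 := by
    rw [show budget - a - b = (budget - b) + (-1) * a by ring,
        Int.add_mul_ediv_right _ _ (by omega : a ≠ 0)]; ring
  rw [harith, ← count_shift a b budget ((budget - b) / a)]
  rw [alt_count a b budget ((budget - b) / a) ha hb]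
  cases (PySem.List.pyRange 1 (min (|b| / (Int.gcd a b : ℤ)) ((budget - b) / a) + 1) 1).find?
      (fun k => PySem.Int.mod (budget - k * a) b == 0) with
  | none => simp only; split_ifs <;> ring
  | some k0 => simp only; split_ifs <;> ring
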